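-- pv_equiv track=rewrite | github.com/lamantinX/perenoska | .instructions/.scripts/find-references.py | format_text_output
-- ===== SOURCE A (Python) =====
-- def format_text_output(references: list[dict], target: str) -> str:
--     """Форматировать вывод для терминала."""
--     if not references:
--         return f"Ссылки на '{target}' не найдены"
--
--     lines = [f"Найдено ссылок: {len(references)}", ""]
--
--     current_file = None
--     for ref in references:
--         if ref["file"] != current_file:
--             current_file = ref["file"]
--             lines.append(f"📄 {current_file}")
--
--         lines.append(f"   {ref['line']}: {ref['content'][:80]}{'...' if len(ref['content']) > 80 else ''}")
--
--     return "\n".join(lines)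
-- ===== SOURCE B (Python) =====
-- def _group_by_file(references):
--     """Consecutive refs with the same file collected into (file, [refs]) groups."""
--     groups = []
--     for ref in references:
--         f = ref["file"]
--         if groups and groups[-1][0] == f:
--             groups[-1][1].append(ref)
--         else:
--             groups.append((f, [ref]))
--     return groups
--
--
-- def _fmt_ref(ref):
--     content = ref["content"]
--     return f"   {ref['line']}: {content[:80]}{'...' if len(content) > 80 else ''}"
--
--
-- def format_text_output(references: list[dict], target: str) -> str:
--     """Форматировать вывод для терминала."""
--     if not references:
--         return f"Ссылки на '{target}' не найдены"
--
--     body = []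
--     for file, refs in _group_by_file(references):
--         body.append(f"📄 {file}")
--         for ref in refs:
--             body.append(_fmt_ref(ref))
--
--     return "\n".join([f"Найдено ссылок: {len(references)}", ""] + body)
-- ===== Notes on version B (the rewrite author's own statement) =====
-- stated objective: alternative
-- what changed: B first builds an explicit list of (file, refs) groups of consecutive same-file references, then renders each group with a header and its lines, instead of A's single pass that threads a current_file sentinel through the output list.
-- outside the precondition, e.g. on format_text_output([{'file': 'a.py'}], 'x'): A raises KeyError, B raises KeyError
import Mathlib
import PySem

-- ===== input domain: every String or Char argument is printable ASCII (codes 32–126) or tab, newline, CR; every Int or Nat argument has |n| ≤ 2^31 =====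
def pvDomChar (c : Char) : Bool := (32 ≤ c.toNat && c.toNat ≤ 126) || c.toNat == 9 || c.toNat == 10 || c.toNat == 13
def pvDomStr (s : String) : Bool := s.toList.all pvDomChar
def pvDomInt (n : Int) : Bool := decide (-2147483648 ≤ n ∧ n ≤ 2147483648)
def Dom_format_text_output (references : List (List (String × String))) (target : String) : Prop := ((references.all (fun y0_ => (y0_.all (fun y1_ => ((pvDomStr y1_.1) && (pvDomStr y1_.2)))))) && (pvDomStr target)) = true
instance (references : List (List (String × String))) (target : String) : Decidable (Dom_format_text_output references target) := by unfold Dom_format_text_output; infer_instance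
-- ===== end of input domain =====

-- B groups consecutive same-file references first and then renders the groups,
-- instead of A's single pass threading a current_file sentinel; same cost, alternative structure.

-- first-match lookup in the dict (Python ref[k]; none = KeyError, excluded by Pre_)
def pvGetKey (ref : List (String × String)) (k : String) : String :=
  ((ref.find? (fun p => p.1 == k)).map (·.2)).getD ""

-- f"   {ref['line']}: {ref['content'][:80]}{'...' if len(ref['content']) > 80 else ''}"
def pvFmtRef (ref : List (String × String)) : String :=
  let content := pvGetKey ref "content"
  "   " ++ pvGetKey ref "line" ++ ": " ++ PySem.Str.slice content none (some 80) ++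
    (if PySem.Str.len content > 80 then "..." else "")

-- ===== PORT A =====
-- A's loop: state = (lines so far, current_file : Option String)
def pvAStep (st : List String × Option String) (ref : List (String × String)) :
    List String × Option String :=
  let f := pvGetKey ref "file"
  let ls := if some f ≠ st.2 then st.1 ++ ["📄 " ++ f] else st.1
  (ls ++ [pvFmtRef ref], some f)

def format_text_output (references : List (List (String × String))) (target : String) : String :=
  if references = [] then "Ссылки на '" ++ target ++ "' не найдены"
  else
    let init := ["Найдено ссылок: " ++ PySem.Int.toStr (references.length : Int), ""]
    PySem.Str.join "\n" (references.foldl pvAStep (init, none)).1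

-- ===== PORT B =====
-- _group_by_file: append to the last group when the file matches, else open a new group
def pvGroupStep (groups : List (String × List (List (String × String))))
    (ref : List (String × String)) : List (String × List (List (String × String))) :=
  let f := pvGetKey ref "file"
  match groups.getLast? with
  | some (g, rs) => if g = f then groups.dropLast ++ [(g, rs ++ [ref])] else groups ++ [(f, [ref])]
  | none => [(f, [ref])]

-- the nested rendering loop over groups
def pvRenderGroups (groups : List (String × List (List (String × String)))) : List String :=
  groups.flatMap (fun gr => ("📄 " ++ gr.1) :: gr.2.map pvFmtRef)

def format_text_output_alt (references : List (List (String × String))) (target : String) : String :=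
  if references = [] then "Ссылки на '" ++ target ++ "' не найдены"
  else
    let body := pvRenderGroups (references.foldl pvGroupStep [])
    PySem.Str.join "\n" (["Найдено ссылок: " ++ PySem.Int.toStr (references.length : Int), ""] ++ body)

-- ===== PRECONDITION & SPEC =====
-- Pre_ excludes refs missing one of the keys "file"/"line"/"content": A raises KeyError there.
def Pre_format_text_output (references : List (List (String × String))) (target : String) : Prop :=
  references.all (fun ref =>
    (ref.find? (fun p => p.1 == "file")).isSome &&
    (ref.find? (fun p => p.1 == "line")).isSome &&
    (ref.find? (fun p => p.1 == "content")).isSome) = true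

instance (references : List (List (String × String))) (target : String) :
    Decidable (Pre_format_text_output references target) := by
  unfold Pre_format_text_output; infer_instance

def pvWitness_format_text_output : (List (List (String × String))) × String :=
  ([[("file", "a.py"), ("line", "3"), ("content", "x = 1")],
    [("file", "a.py"), ("line", "7"), ("content", "y = x")],
    [("file", "b.py"), ("line", "1"), ("content", "import a")]], "x")

def Spec_format_text_output (references : List (List (String × String))) (target : String) (out : String) : Prop := out = format_text_output_alt references target
instance (references : List (List (String × String))) (target : String) (out : String) : Decidable (Spec_format_text_output references target out) := by unfold Spec_format_text_output; infer_instance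

-- ===== CLAIM (what is proved, stated in full; the proofs are below) =====
def Claim_equal_format_text_output : Prop := ∀ (references : List (List (String × String))) (target : String), Dom_format_text_output references target → Pre_format_text_output references target → Spec_format_text_output references target (format_text_output references target)

-- ===== LEMMAS AND PROOFS =====

-- common recursive rendering of the tail, given the file the last emitted header was for
def pvSpecLines (cur : Option String) : List (List (String × String)) → List String
  | [] => []
  | r :: rs =>
    let f := pvGetKey r "file"
    (if some f ≠ cur then ["📄 " ++ f] else []) ++ (pvFmtRef r :: pvSpecLines (some f) rs)

theorem pvA_loop (refs : List (List (String × String))) :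
    ∀ (acc : List String) (cur : Option String),
      (refs.foldl pvAStep (acc, cur)).1 = acc ++ pvSpecLines cur refs := by
  induction refs with
  | nil => intro acc cur; simp [pvSpecLines]
  | cons r rs ih =>
    intro acc cur
    simp only [List.foldl_cons, pvAStep, pvSpecLines]
    by_cases h : some (pvGetKey r "file") ≠ cur
    · simp [h, ih]
    · simp [h, ih]

theorem pvB_loop (more : List (List (String × String))) :
    ∀ (gs : List (String × List (List (String × String)))) (g : String)
      (rs : List (List (String × String))),
      pvRenderGroups (more.foldl pvGroupStep (gs ++ [(g, rs)])) =
        pvRenderGroups gs ++ ("📄 " ++ g) :: rs.map pvFmtRef ++ pvSpecLines (some g) more := by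
  induction more with
  | nil => intro gs g rs; simp [pvRenderGroups, pvSpecLines]
  | cons r rest ih =>
    intro gs g rs
    simp only [List.foldl_cons, pvGroupStep, List.getLast?_append,
      List.getLast?_singleton, Option.some_or]
    by_cases h : g = pvGetKey r "file"
    · simp only [h, if_true, List.dropLast_concat]
      rw [ih]
      simp [pvSpecLines, ← h, pvRenderGroups]
    · rw [if_neg h]
      rw [show gs ++ [(g, rs)] ++ [(pvGetKey r "file", [r])] =
            (gs ++ [(g, rs)]) ++ [(pvGetKey r "file", [r])] from rfl, ih (gs ++ [(g, rs)])]
      simp [pvSpecLines, pvRenderGroups, Ne.symm h]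

theorem pv_main (refs : List (List (String × String))) :
    pvSpecLines none refs = pvRenderGroups (refs.foldl pvGroupStep []) := by
  cases refs with
  | nil => simp [pvSpecLines, pvRenderGroups]
  | cons r rs =>
    have h0 : pvGroupStep [] r = [] ++ [(pvGetKey r "file", [r])] := by
      simp [pvGroupStep]
    simp only [List.foldl_cons, h0, pvB_loop, pvSpecLines]
    simp [pvRenderGroups]

-- ===== VERDICT (by name: the statement is the Claim_ definition above) =====
theorem format_text_output_spec : Claim_equal_format_text_output := by
  intro references target _ _
  unfold Spec_format_text_output format_text_output format_text_output_alt
  by_cases h : references = []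
  · simp [h]
  · simp only [if_neg h]
    rw [pvA_loop, pv_main]
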